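-- pv_equiv track=rewrite | github.com/sergeyst80/les01 | clock.py | animation_generator
-- ===== SOURCE A (Python) =====
-- def animation_generator(val):
--     if val > 2:
--         temp = val - 2
--
--         while val > 0:
--             val -= 1
--             yield val
--
--         while val < temp:
--             val += 1
--             yield val
--
--     else:
--         out = 0
--
--         while out < val:
--             yield out
--             out += 1
-- ===== SOURCE B (Python) =====
-- def animation_generator(val):
--     if val > 2:
--         for i in range(2 * val - 2):
--             yield abs(i - (val - 1))
--     else:
--         for i in range(val):
--             yield i
-- ===== Notes on version B (the rewrite author's own statement) =====
-- stated objective: simpler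
-- what changed: Replaces A's two opposite-direction while-loops (count down to 0, then count back up) with a single index-driven pass emitting abs(i - (val-1)), and the small-val while-loop with a plain range loop.
import Mathlib
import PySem

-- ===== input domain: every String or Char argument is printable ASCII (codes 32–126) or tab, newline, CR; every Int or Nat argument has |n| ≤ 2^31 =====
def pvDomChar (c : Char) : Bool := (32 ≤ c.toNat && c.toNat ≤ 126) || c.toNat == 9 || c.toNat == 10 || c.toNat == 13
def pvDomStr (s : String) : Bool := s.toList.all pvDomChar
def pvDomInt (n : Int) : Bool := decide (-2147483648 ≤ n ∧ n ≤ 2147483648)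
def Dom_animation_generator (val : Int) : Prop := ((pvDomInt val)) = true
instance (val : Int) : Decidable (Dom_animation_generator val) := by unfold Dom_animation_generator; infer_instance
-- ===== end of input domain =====

-- B replaces A's two opposite-direction while-loops with one index-driven pass yielding |i-(val-1)| (objective: simpler).
-- ===== PORT A =====
-- while val > 0: val -= 1; yield val
def agLoopDown (v : Int) : List Int :=
  if _h : v > 0 then (v - 1) :: agLoopDown (v - 1) else []
termination_by v.toNat
decreasing_by omega

-- while val < temp: val += 1; yield val
def agLoopUp (v temp : Int) : List Int :=
  if _h : v < temp then (v + 1) :: agLoopUp (v + 1) temp else []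
termination_by (temp - v).toNat
decreasing_by omega

-- while out < val: yield out; out += 1
def agLoopOut (out val : Int) : List Int :=
  if _h : out < val then out :: agLoopOut (out + 1) val else []
termination_by (val - out).toNat
decreasing_by omega

def animation_generator (val : Int) : List Int :=
  if val > 2 then
    agLoopDown val ++ agLoopUp 0 (val - 2)
  else
    agLoopOut 0 val

-- ===== PORT B =====
def animation_generator_alt (val : Int) : List Int :=
  if val > 2 then
    (PySem.List.pyRange 0 (2 * val - 2) 1).map (fun i => |i - (val - 1)|)
  else
    PySem.List.pyRange 0 val 1

-- ===== PRECONDITION & SPEC =====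
def Spec_animation_generator (val : Int) (out : List Int) : Prop := out = animation_generator_alt val
instance (val : Int) (out : List Int) : Decidable (Spec_animation_generator val out) := by unfold Spec_animation_generator; infer_instance

-- ===== CLAIM (what is proved, stated in full; the proofs are below) =====
def Claim_equal_animation_generator : Prop := ∀ (val : Int), Dom_animation_generator val → Spec_animation_generator val (animation_generator val)

-- ===== LEMMAS AND PROOFS =====
theorem agLoopDown_eq (n : Nat) : agLoopDown (n : Int) = (List.range n).map (fun k : Nat => (n : Int) - 1 - (k : Int)) := by
  induction n with
  | zero => rw [agLoopDown]; simp
  | succ m ih =>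
    rw [agLoopDown]
    have h : ((m : Int) + 1) > 0 := by omega
    push_cast
    rw [dif_pos h]
    rw [List.range_succ_eq_map, List.map_cons, List.map_map]
    congr 1
    · push_cast; omega
    · rw [show ((m : Int) + 1 - 1) = (m : Int) by omega, ih]
      apply List.map_congr_left
      intro k _
      simp only [Function.comp]
      push_cast
      omega

theorem agLoopUp_eq (n : Nat) (v : Int) : agLoopUp v (v + n) = (List.range n).map (fun k : Nat => v + 1 + (k : Int)) := by
  induction n generalizing v with
  | zero => rw [agLoopUp]; simp
  | succ m ih =>
    rw [agLoopUp]
    have h : v < v + ((m + 1 : Nat) : Int) := by push_cast; omega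
    rw [dif_pos h]
    have h2 := ih (v + 1)
    rw [show (v + 1) + (m : Int) = v + ((m + 1 : Nat) : Int) by push_cast; omega] at h2
    rw [h2, List.range_succ_eq_map, List.map_cons, List.map_map]
    congr 1
    · omega
    · apply List.map_congr_left
      intro k _
      simp only [Function.comp]
      push_cast
      omega

theorem agLoopOut_eq (n : Nat) (out : Int) : agLoopOut out (out + n) = (List.range n).map (fun k : Nat => out + (k : Int)) := by
  induction n generalizing out with
  | zero => rw [agLoopOut]; simp
  | succ m ih =>
    rw [agLoopOut]
    have h : out < out + ((m + 1 : Nat) : Int) := by push_cast; omega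
    rw [dif_pos h]
    have h2 := ih (out + 1)
    rw [show (out + 1) + (m : Int) = out + ((m + 1 : Nat) : Int) by push_cast; omega] at h2
    rw [h2, List.range_succ_eq_map, List.map_cons, List.map_map]
    congr 1
    · simp
    · apply List.map_congr_left
      intro k _
      simp only [Function.comp]
      push_cast
      omega

-- ===== VERDICT (by name: the statement is the Claim_ definition above) =====
theorem animation_generator_spec : Claim_equal_animation_generator := by
  intro val _
  unfold Spec_animation_generator animation_generator animation_generator_alt
  by_cases hv : val > 2
  · simp only [if_pos hv]
    set n := val.toNat with hn
    have hval : val = (n : Int) := by omega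
    have hn3 : 3 ≤ n := by omega
    rw [hval]
    rw [agLoopDown_eq n]
    have h2 : agLoopUp 0 ((n : Int) - 2) = (List.range (n - 2)).map (fun k : Nat => (0 : Int) + 1 + (k : Int)) := by
      have := agLoopUp_eq (n - 2) 0
      rw [show (0 : Int) + ((n - 2 : Nat) : Int) = (n : Int) - 2 by omega] at this
      exact this
    rw [h2, PySem.List.pyRange_one]
    have hlen : (2 * (n : Int) - 2 - 0).toNat = n + (n - 2) := by omega
    rw [hlen, List.range_add, List.map_append, List.map_append]
    simp only [List.map_map]
    congr 1
    · apply List.map_congr_left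
      intro k hk
      simp only [List.mem_range] at hk
      simp only [Function.comp]
      have hle : ((0 : Int) + (k : Int)) - ((n : Int) - 1) ≤ 0 := by omega
      rw [abs_of_nonpos hle]
      omega
    · apply List.map_congr_left
      intro k hk
      simp only [List.mem_range] at hk
      simp only [Function.comp]
      have hge : (0 : Int) ≤ ((0 : Int) + ((n + k : Nat) : Int)) - ((n : Int) - 1) := by push_cast; omega
      rw [abs_of_nonneg hge]
      push_cast
      omega
  · simp only [if_neg hv]
    rw [PySem.List.pyRange_one]
    by_cases hp : 0 ≤ val
    · have h2 := agLoopOut_eq val.toNat 0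
      rw [show (0 : Int) + (val.toNat : Int) = val by omega] at h2
      rw [show (val - 0).toNat = val.toNat by omega, h2]
    · rw [agLoopOut]
      have h0 : ¬ (0 < val) := by omega
      rw [dif_neg h0]
      simp
      omega
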